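-- pv_equiv track=rewrite | github.com/neufvilles/pairing_RTL_automation | python/lib/util.py | bits_list
-- ===== SOURCE A (Python) =====
-- def bits_list(a):  # -1, 0, 1
--     a_abs = abs(a)
--     mask = 0b11
--     res = []
--     while (a_abs != 0):
--         if (a_abs & 1):
--             ui = 2 - (a_abs & mask)
--             if (ui > 0):
--                 a_abs -= 1
--             else:
--                 a_abs += 1
--             res.append(ui)
--         else:
--             res.append(0)
--         a_abs >>= 1
--     if (a < 0):
--         res = [-ui for ui in res]
--     return res
-- ===== SOURCE B (Python) =====
-- def bits_list(a):  # -1, 0, 1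
--     n = abs(a)
--     if n == 0:
--         return []
--     t = 3 * n
--     L = t.bit_length() - 1
--     if a > 0:
--         return [((t >> (i + 1)) & 1) - ((n >> (i + 1)) & 1) for i in range(L)]
--     return [((n >> (i + 1)) & 1) - ((t >> (i + 1)) & 1) for i in range(L)]
-- ===== Notes on version B (the rewrite author's own statement) =====
-- stated objective: alternative
-- what changed: Replaces A's destructive mod-4 reduction while-loop (repeatedly adjusting and halving |a|) with the closed-form 3n trick: digit i of the NAF is bit (i+1) of 3|a| minus bit (i+1) of |a|, emitted by a single comprehension over range(bit_length(3|a|)-1).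
import Mathlib
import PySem

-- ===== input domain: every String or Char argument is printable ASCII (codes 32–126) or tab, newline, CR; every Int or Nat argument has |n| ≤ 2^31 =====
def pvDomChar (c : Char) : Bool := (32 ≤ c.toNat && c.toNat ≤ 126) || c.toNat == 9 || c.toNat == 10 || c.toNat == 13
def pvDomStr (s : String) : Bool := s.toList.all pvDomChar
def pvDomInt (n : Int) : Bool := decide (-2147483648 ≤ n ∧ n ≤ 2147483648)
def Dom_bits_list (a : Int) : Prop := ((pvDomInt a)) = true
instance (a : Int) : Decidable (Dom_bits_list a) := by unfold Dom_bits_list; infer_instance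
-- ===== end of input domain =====

-- B replaces A's destructive mod-4 reduction loop with the closed-form "3n trick":
-- NAF digit i of n is bit (i+1) of 3n minus bit (i+1) of n (objective: alternative algorithm, not faster).

-- ===== PORT A =====
-- A's while-loop over the nonnegative a_abs; a_abs & 1 = m % 2, a_abs & 0b11 = m % 4,
-- a_abs >> 1 = m / 2 (exact on nonnegative ints, which a_abs always is).
def pvNafA (m : Nat) : List Int :=
  if _h0 : m = 0 then []
  else if _h1 : m % 2 = 1 then
    if _h2 : (2 - (m % 4 : Int)) > 0 then
      (2 - (m % 4 : Int)) :: pvNafA ((m - 1) / 2)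
    else
      (2 - (m % 4 : Int)) :: pvNafA ((m + 1) / 2)
  else 0 :: pvNafA (m / 2)
termination_by m
decreasing_by
  · omega
  · -- here ¬(2 - (m % 4) > 0) and m odd, so m % 4 = 3 and m ≥ 3
    simp only [not_lt] at _h2
    omega
  · omega

def bits_list (a : Int) : List Int :=
  let res := pvNafA a.natAbs
  if a < 0 then res.map (fun ui => -ui) else res

-- ===== PORT B =====
-- literal port of Source B: n = abs(a); t = 3*n; L = t.bit_length() - 1 (bit_length t = Nat.log2 t + 1
-- for t > 0); one comprehension over range(L), with the operands swapped when a < 0.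
def bits_list_alt (a : Int) : List Int :=
  let n := a.natAbs
  if n = 0 then []
  else
    let t := 3 * n
    let L := (Nat.log2 t + 1) - 1
    if 0 < a then
      (List.range L).map (fun i => (((t >>> (i+1)) % 2 : Nat) : Int) - (((n >>> (i+1)) % 2 : Nat) : Int))
    else
      (List.range L).map (fun i => (((n >>> (i+1)) % 2 : Nat) : Int) - (((t >>> (i+1)) % 2 : Nat) : Int))

-- ===== PRECONDITION & SPEC =====
def Spec_bits_list (a : Int) (out : List Int) : Prop := out = bits_list_alt a
instance (a : Int) (out : List Int) : Decidable (Spec_bits_list a out) := by unfold Spec_bits_list; infer_instance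

-- ===== CLAIM (what is proved, stated in full; the proofs are below) =====
def Claim_equal_bits_list : Prop := ∀ (a : Int), Dom_bits_list a → Spec_bits_list a (bits_list a)

-- ===== LEMMAS AND PROOFS =====

-- bit j of x, as an Int
def pvBit (j x : Nat) : Int := ((x >>> j) % 2 : Nat)

-- list of bit-differences of x and y at positions 0..L-1
def pvD (L x y : Nat) : List Int := (List.range L).map (fun i => pvBit i x - pvBit i y)

-- the positive-case value of B, in proof-friendly form
def pvNafB (m : Nat) : List Int :=
  (List.range (Nat.log2 (3 * m))).map (fun i => pvBit (i+1) (3 * m) - pvBit (i+1) m)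

theorem pvBit_succ (j x : Nat) : pvBit (j+1) x = pvBit j (x / 2) := by
  simp only [pvBit, Nat.shiftRight_eq_div_pow, pow_succ, Nat.div_div_eq_div_mul]
  ring_nf

theorem pvBit_zero (x : Nat) : pvBit 0 x = ((x % 2 : Nat) : Int) := by
  simp [pvBit]

theorem pvD_succ (L x y : Nat) :
    pvD (L+1) x y = (pvBit 0 x - pvBit 0 y) :: pvD L (x / 2) (y / 2) := by
  simp only [pvD, List.range_succ_eq_map, List.map_cons, List.map_map]
  refine congrArg _ (List.map_congr_left fun i _ => ?_)
  simp [Function.comp, pvBit_succ]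

theorem pvNafB_eq_pvD (m : Nat) :
    pvNafB m = pvD (Nat.log2 (3 * m)) ((3 * m) / 2) (m / 2) := by
  simp only [pvNafB, pvD]
  exact List.map_congr_left fun i _ => by rw [pvBit_succ, pvBit_succ]

-- the carry lemma: shifting between (3k+2, k) and (3k+3, k+1) yields the same bit differences
theorem pvE (L : Nat) : ∀ k : Nat, pvD L (3*k+2) k = pvD L (3*k+3) (k+1) := by
  induction L with
  | zero => intro k; simp [pvD]
  | succ L ih =>
    intro k
    rw [pvD_succ, pvD_succ]
    rcases Nat.even_or_odd k with ⟨j, hj⟩ | ⟨j, hj⟩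
    · subst hj
      have h1 : (3*(j+j)+2) / 2 = 3*j+1 := by omega
      have h2 : (j+j) / 2 = j := by omega
      have h3 : (3*(j+j)+3) / 2 = 3*j+1 := by omega
      have h4 : (j+j+1) / 2 = j := by omega
      rw [h1, h2, h3, h4]
      simp only [pvBit_zero]
      have : (3*(j+j)+2) % 2 = 0 ∧ (j+j) % 2 = 0 ∧ (3*(j+j)+3) % 2 = 1 ∧ (j+j+1) % 2 = 1 := by omega
      rw [this.1, this.2.1, this.2.2.1, this.2.2.2]
      norm_num
    · subst hj
      have h1 : (3*(2*j+1)+2) / 2 = 3*j+2 := by omega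
      have h2 : (2*j+1) / 2 = j := by omega
      have h3 : (3*(2*j+1)+3) / 2 = 3*j+3 := by omega
      have h4 : (2*j+1+1) / 2 = j+1 := by omega
      rw [h1, h2, h3, h4, ih j]
      simp only [pvBit_zero]
      have : (3*(2*j+1)+2) % 2 = 1 ∧ (2*j+1) % 2 = 1 ∧ (3*(2*j+1)+3) % 2 = 0 ∧ (2*j+1+1) % 2 = 0 := by omega
      rw [this.1, this.2.1, this.2.2.1, this.2.2.2]
      norm_num

theorem pvLog2_eq {x L : Nat} (h1 : 2^L ≤ x) (h2 : x < 2^(L+1)) : Nat.log2 x = L := by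
  rw [Nat.log2_eq_log_two]; exact Nat.log_eq_of_pow_le_of_lt_pow h1 h2

theorem pvPow_ne_three_mul (L k : Nat) (_hk : k ≠ 0) : 2^L ≠ 3 * k := by
  intro h
  have h3 : (3 : Nat) ∣ 2^L := ⟨k, h⟩
  have := (Nat.Prime.dvd_of_dvd_pow (p := 3) (n := L) (by norm_num) h3)
  omega

theorem pvLog2_bounds (x : Nat) (hx : x ≠ 0) :
    2^(Nat.log2 x) ≤ x ∧ x < 2^(Nat.log2 x + 1) := by
  constructor
  · rw [Nat.log2_eq_log_two]; exact Nat.pow_log_le_self 2 hx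
  · rw [Nat.log2_eq_log_two]; exact Nat.lt_pow_succ_log_self (by norm_num) x

-- log2(12k+3) = log2(6k) + 1 for k ≥ 1
theorem pvLog2_a (k : Nat) (_hk : k ≠ 0) : Nat.log2 (12*k+3) = Nat.log2 (6*k) + 1 := by
  obtain ⟨hlo, hhi⟩ := pvLog2_bounds (6*k) (by omega)
  set L := Nat.log2 (6*k) with hL
  have hne : 2^(L+1) ≠ 6*k+1 := by
    intro h
    have : 2^(L+1) % 2 = 0 := by simp [pow_succ]
    omega
  refine pvLog2_eq ?_ ?_
  · have : 2^(L+1) = 2 * 2^L := by ring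
    omega
  · have : 2^(L+1+1) = 2 * 2^(L+1) := by ring
    omega

-- log2(12k+9) = log2(6k+6) + 1
theorem pvAux (L k : Nat) : 2^(L+1) ≠ 12*k+10 := by
  intro h
  have h1 : 2^(L+1) = 2 * 2^L := by ring
  have hodd : 2^L = 6*k+5 := by omega
  cases L with
  | zero => simp at hodd
  | succ L' =>
    have h2 : 2^(L'+1) = 2 * 2^L' := by ring
    omega

theorem pvLog2_b (k : Nat) : Nat.log2 (12*k+9) = Nat.log2 (6*k+6) + 1 := by
  obtain ⟨hlo, hhi⟩ := pvLog2_bounds (6*k+6) (by omega)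
  set L := Nat.log2 (6*k+6) with hL
  have hne1 : 2^(L+1) ≠ 12*k+12 := by
    have := pvPow_ne_three_mul (L+1) (4*k+4) (by omega)
    omega
  have hne2 : 2^(L+1) ≠ 12*k+10 := pvAux L k
  refine pvLog2_eq ?_ ?_
  · have : 2^(L+1) = 2 * 2^L := by ring
    omega
  · have : 2^(L+1+1) = 2 * 2^(L+1) := by ring
    omega

-- log2(6k) = log2(3k) + 1 for k ≥ 1
theorem pvLog2_c (k : Nat) (hk : k ≠ 0) : Nat.log2 (6*k) = Nat.log2 (3*k) + 1 := by
  have := Nat.log2_two_mul (n := 3*k) (by omega)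
  have h : 6*k = 2*(3*k) := by ring
  rw [h, this]

-- the core equivalence of the two algorithms on nonnegative input
theorem pvNafA_eq_pvNafB : ∀ m : Nat, pvNafA m = pvNafB m := by
  intro m
  induction m using Nat.strong_induction_on with
  | _ m ih =>
    rw [pvNafA]
    by_cases h0 : m = 0
    · subst h0; simp [pvNafB, Nat.log2]
    · simp only [dif_neg h0]
      by_cases h1 : m % 2 = 1
      · simp only [dif_pos h1]
        by_cases h2 : (2 - (m % 4 : Int)) > 0
        · -- m % 4 = 1, so m = 4k+1, ui = 1
          have hm4 : m % 4 = 1 := by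
            have : ((m % 4 : Nat) : Int) < 2 := by omega
            omega
          obtain ⟨k, rfl⟩ : ∃ k, m = 4*k+1 := ⟨m / 4, by omega⟩
          simp only [dif_pos h2]
          have harg : (4*k+1-1)/2 = 2*k := by omega
          rw [harg, ih (2*k) (by omega)]
          by_cases hk : k = 0
          · subst hk; norm_num; decide
          · rw [pvNafB_eq_pvD, pvNafB_eq_pvD]
            have e1 : 3*(4*k+1) = 12*k+3 := by ring
            have e2 : (12*k+3)/2 = 6*k+1 := by omega
            have e3 : (4*k+1)/2 = 2*k := by omega
            rw [e1, e2, e3, pvLog2_a k hk, pvD_succ]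
            have e4 : (6*k+1)/2 = 3*k := by omega
            have e5 : (2*k)/2 = k := by omega
            have e6 : 3*(2*k) = 6*k := by ring
            have e7 : (6*k)/2 = 3*k := by omega
            rw [e4, e5, e6, e7]
            simp only [pvBit_zero]
            congr 1
            omega
        · -- m % 4 = 3, so m = 4k+3, ui = -1
          have hm4 : m % 4 = 3 := by
            have : (2 : Int) - ((m % 4 : Nat) : Int) ≤ 0 := by omega
            omega
          obtain ⟨k, rfl⟩ : ∃ k, m = 4*k+3 := ⟨m / 4, by omega⟩
          simp only [dif_neg h2]
          have harg : (4*k+3+1)/2 = 2*k+2 := by omega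
          rw [harg, ih (2*k+2) (by omega)]
          rw [pvNafB_eq_pvD, pvNafB_eq_pvD]
          have e1 : 3*(4*k+3) = 12*k+9 := by ring
          have e2 : (12*k+9)/2 = 6*k+4 := by omega
          have e3 : (4*k+3)/2 = 2*k+1 := by omega
          rw [e1, e2, e3, pvLog2_b k, pvD_succ]
          have e4 : (6*k+4)/2 = 3*k+2 := by omega
          have e5 : (2*k+1)/2 = k := by omega
          have e6 : 3*(2*k+2) = 6*k+6 := by ring
          have e7 : (6*k+6)/2 = 3*k+3 := by omega
          have e8 : (2*k+2)/2 = k+1 := by omega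
          rw [e4, e5, e6, e7, e8, pvE]
          simp only [pvBit_zero]
          congr 1
          omega
      · -- m even, m = 2k with k > 0
        simp only [dif_neg h1]
        obtain ⟨k, rfl⟩ : ∃ k, m = 2*k := ⟨m / 2, by omega⟩
        have hk : k ≠ 0 := by omega
        have harg : (2*k)/2 = k := by omega
        rw [harg, ih k (by omega)]
        rw [pvNafB_eq_pvD, pvNafB_eq_pvD]
        have e1 : 3*(2*k) = 6*k := by ring
        have e2 : (6*k)/2 = 3*k := by omega
        rw [e1, e2, harg, pvLog2_c k hk, pvD_succ]
        simp only [pvBit_zero]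
        congr 1
        omega

-- bits_list_alt, rewritten through pvNafB
theorem bits_list_alt_pos (a : Int) (ha : 0 < a) : bits_list_alt a = pvNafB a.natAbs := by
  have hn : a.natAbs ≠ 0 := by
    simp [Int.natAbs_eq_zero]; omega
  simp only [bits_list_alt, pvNafB, if_neg hn, if_pos ha, pvBit]
  rfl

theorem bits_list_alt_neg (a : Int) (ha : a < 0) :
    bits_list_alt a = (pvNafB a.natAbs).map (fun ui => -ui) := by
  have hn : a.natAbs ≠ 0 := by
    simp [Int.natAbs_eq_zero]; omega
  have ha' : ¬ (0 < a) := by omega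
  simp only [bits_list_alt, pvNafB, if_neg hn, if_neg ha', List.map_map, pvBit]
  exact List.map_congr_left fun i _ => by simp only [Function.comp]; ring

-- ===== VERDICT (by name: the statement is the Claim_ definition above) =====
theorem bits_list_spec : Claim_equal_bits_list := by
  intro a _
  unfold Spec_bits_list bits_list
  rcases lt_trichotomy a 0 with ha | ha | ha
  · simp only [if_pos ha, bits_list_alt_neg a ha, pvNafA_eq_pvNafB]
  · subst ha
    have h1 : pvNafA 0 = [] := by rw [pvNafA]; simp
    simp [bits_list_alt, h1]
  · have ha' : ¬ (a < 0) := by omega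
    simp only [if_neg ha', bits_list_alt_pos a ha, pvNafA_eq_pvNafB]
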